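-- pv_equiv track=rewrite | github.com/kalimosd/offerpilot-ai | skill-pack/scripts/run_pipeline.py | expand_profile_tags
-- ===== SOURCE A (Python) =====
-- def expand_profile_tags(tags: set[str], aliases: dict[str, list[str]]) -> set[str]:
--     """Expand profile tags with their aliases for broader matching."""
--     expanded = set(tags)
--     for canonical, alias_list in aliases.items():
--         if canonical.lower() in tags:
--             expanded.update(a.lower() for a in alias_list)
--         for alias in alias_list:
--             if alias.lower() in tags:
--                 expanded.add(canonical.lower())
--                 expanded.update(a.lower() for a in alias_list)
--                 break
--     return expanded
-- ===== SOURCE B (Python) =====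
-- def expand_profile_tags(tags: set[str], aliases: dict[str, list[str]]) -> set[str]:
--     """Expand profile tags with their aliases for broader matching.
--
--     Inverted-index approach: instead of scanning every alias group against the
--     tag set, build once an index from each lowercased group member to the ids
--     of the groups it belongs to, discover the matched groups by looking up the
--     tags themselves, then emit every matched group.
--     """
--     groups = [[canonical.lower()] + [a.lower() for a in alias_list]
--               for canonical, alias_list in aliases.items()]
--     index: dict[str, list[int]] = {}
--     for i, group in enumerate(groups):
--         for member in group:
--             index.setdefault(member, []).append(i)
--     hit = set()
--     for t in tags:
--         hit.update(index.get(t, []))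
--     expanded = set(tags)
--     for i, group in enumerate(groups):
--         if i in hit:
--             expanded.update(group)
--     return expanded
-- ===== Notes on version B (the rewrite author's own statement) =====
-- stated objective: alternative
-- what changed: B replaces A's per-group membership scans against the tag set by an inverted index: it builds once a dict from every lowercased group member to the ids of its groups, discovers the matched group ids by looking up the tags themselves, and emits the matched groups in a final pass.
import Mathlib
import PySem

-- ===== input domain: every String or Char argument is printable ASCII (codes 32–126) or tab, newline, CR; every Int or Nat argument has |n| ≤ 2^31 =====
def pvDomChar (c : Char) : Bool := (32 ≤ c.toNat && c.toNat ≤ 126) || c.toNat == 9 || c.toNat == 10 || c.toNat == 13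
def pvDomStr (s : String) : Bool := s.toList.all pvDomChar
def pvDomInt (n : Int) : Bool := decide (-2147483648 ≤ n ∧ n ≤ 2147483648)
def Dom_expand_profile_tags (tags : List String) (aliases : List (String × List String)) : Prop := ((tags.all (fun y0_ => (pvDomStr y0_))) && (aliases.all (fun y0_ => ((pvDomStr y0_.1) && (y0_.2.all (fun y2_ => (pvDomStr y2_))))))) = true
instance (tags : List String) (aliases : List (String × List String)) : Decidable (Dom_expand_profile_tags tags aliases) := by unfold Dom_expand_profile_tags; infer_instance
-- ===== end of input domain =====

-- B replaces A's per-group membership scans against the tag set by an inverted index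
-- (member -> group ids) built once, with matches discovered by looking up the tags themselves.


-- ===== PORT A =====
-- literal transliteration of A: start from set(tags); per dict item, a canonical-in-tags test
-- adding the lowercased aliases, then the alias loop whose body (add canonical.lower() and all
-- lowercased aliases, then break) fires iff some alias lowers into tags.
def expand_profile_tags (tags : List String) (aliases : List (String × List String)) : List String :=
  aliases.foldl (fun expanded p =>
    let expanded1 :=
      if PySem.Set.contains tags (PySem.Str.lower p.1) then
        PySem.Set.update expanded (p.2.map PySem.Str.lower)
      else expanded
    if p.2.any (fun a => PySem.Set.contains tags (PySem.Str.lower a)) then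
      PySem.Set.update (PySem.Set.add expanded1 (PySem.Str.lower p.1)) (p.2.map PySem.Str.lower)
    else expanded1)
    (PySem.Set.ofList tags)

-- ===== PORT B =====
-- literal transliteration of B: build the lowercased groups, then the inverted index
-- member -> list of group ids (dict with setdefault/append), then the hit set of group ids
-- found by looking up each tag, then emit set(tags) extended with every hit group.
def expand_profile_tags_alt (tags : List String) (aliases : List (String × List String)) : List String :=
  let groups := aliases.map (fun p => PySem.Str.lower p.1 :: p.2.map PySem.Str.lower)
  let index := (PySem.List.enumerate groups).foldl
    (fun d gi => gi.2.foldl (fun d m => PySem.Dict.modify d m [] (fun l => l ++ [gi.1])) d)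
    PySem.Dict.empty
  let hit := tags.foldl (fun s t => PySem.Set.update s (PySem.Dict.getD index t []))
    (PySem.Set.empty : PySem.Set Int)
  (PySem.List.enumerate groups).foldl
    (fun expanded gi =>
      if PySem.Set.contains hit gi.1 then PySem.Set.update expanded gi.2 else expanded)
    (PySem.Set.ofList tags)

-- ===== PRECONDITION & SPEC =====
def Spec_expand_profile_tags (tags : List String) (aliases : List (String × List String)) (out : List String) : Prop := out = expand_profile_tags_alt tags aliases
instance (tags : List String) (aliases : List (String × List String)) (out : List String) : Decidable (Spec_expand_profile_tags tags aliases out) := by unfold Spec_expand_profile_tags; infer_instance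

-- ===== CLAIM (what is proved, stated in full; the proofs are below) =====
def Claim_equal_expand_profile_tags : Prop := ∀ (tags : List String) (aliases : List (String × List String)), Dom_expand_profile_tags tags aliases → Spec_expand_profile_tags tags aliases (expand_profile_tags tags aliases)

-- ===== LEMMAS AND PROOFS =====

-- canonical middle form both ports are reduced to: per alias pair, if any member of the
-- lowercased group is in tags, update the accumulator with the whole group
def canonStep (tags : List String) (s : PySem.Set String) (p : String × List String) : PySem.Set String :=
  if (PySem.Str.lower p.1 :: p.2.map PySem.Str.lower).any (fun m => PySem.Set.contains tags m) then
    PySem.Set.update s (PySem.Str.lower p.1 :: p.2.map PySem.Str.lower)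
  else s

lemma update_update_self (s : PySem.Set String) (L : List String) :
    PySem.Set.update (PySem.Set.update s L) L = PySem.Set.update s L := by
  rw [PySem.Set.update_eq_append_filter (PySem.Set.update s L) L]
  have h : (PySem.Set.ofList L).filter
      (fun y => !(PySem.Set.contains (PySem.Set.update s L) y)) = [] := by
    rw [List.filter_eq_nil_iff]
    intro y hy
    have hyL : y ∈ L := (PySem.Set.mem_ofList (y := y) (xs := L)).mp hy
    simp [PySem.Set.mem_update, hyL]
  rw [h, List.append_nil]

-- A's loop body equals the canonical step whenever the accumulator already contains tags
lemma stepA_eq (tags : List String) (s : PySem.Set String) (p : String × List String)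
    (hinv : ∀ x, PySem.Set.contains tags x = true → x ∈ s) :
    (let expanded1 :=
      if PySem.Set.contains tags (PySem.Str.lower p.1) then
        PySem.Set.update s (p.2.map PySem.Str.lower)
      else s
     if p.2.any (fun a => PySem.Set.contains tags (PySem.Str.lower a)) then
      PySem.Set.update (PySem.Set.add expanded1 (PySem.Str.lower p.1)) (p.2.map PySem.Str.lower)
     else expanded1) = canonStep tags s p := by
  unfold canonStep
  set c := PySem.Str.lower p.1 with hc
  set L := p.2.map PySem.Str.lower with hL
  have hany : p.2.any (fun a => PySem.Set.contains tags (PySem.Str.lower a))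
      = L.any (fun a => PySem.Set.contains tags a) := by
    simp [hL, List.any_map, Function.comp_def]
  have hcons : (c :: L).any (fun m => PySem.Set.contains tags m)
      = (PySem.Set.contains tags c || L.any (fun m => PySem.Set.contains tags m)) := by
    simp
  simp only [hany, hcons, PySem.Set.update_cons]
  by_cases h1 : PySem.Set.contains tags c = true
  · have hcs : c ∈ s := hinv c h1
    by_cases h2 : L.any (fun a => PySem.Set.contains tags a) = true
    · have hcu : c ∈ PySem.Set.update s L := by
        rw [PySem.Set.mem_update]; exact Or.inl hcs
      rw [if_pos h1, if_pos h2, if_pos (by rw [Bool.or_eq_true]; exact Or.inl h1),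
        PySem.Set.add_of_mem hcu, PySem.Set.add_of_mem hcs, update_update_self]
    · rw [if_pos h1, if_neg h2, if_pos (by rw [Bool.or_eq_true]; exact Or.inl h1),
        PySem.Set.add_of_mem hcs]
  · by_cases h2 : L.any (fun a => PySem.Set.contains tags a) = true
    · rw [if_neg h1, if_pos h2, if_pos (by rw [Bool.or_eq_true]; exact Or.inr h2)]
    · rw [if_neg h1, if_neg h2, if_neg (by
        simp only [Bool.or_eq_true]
        rintro (h | h)
        · exact h1 h
        · exact h2 h)]

lemma foldA_eq (tags : List String) (al : List (String × List String)) (s : PySem.Set String)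
    (hinv : ∀ x, PySem.Set.contains tags x = true → x ∈ s) :
    al.foldl (fun expanded p =>
      let expanded1 :=
        if PySem.Set.contains tags (PySem.Str.lower p.1) then
          PySem.Set.update expanded (p.2.map PySem.Str.lower)
        else expanded
      if p.2.any (fun a => PySem.Set.contains tags (PySem.Str.lower a)) then
        PySem.Set.update (PySem.Set.add expanded1 (PySem.Str.lower p.1)) (p.2.map PySem.Str.lower)
      else expanded1) s = al.foldl (canonStep tags) s := by
  induction al generalizing s with
  | nil => rfl
  | cons p rest ih =>
    simp only [List.foldl_cons]
    rw [stepA_eq tags s p hinv]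
    apply ih
    intro x hx
    unfold canonStep
    split
    · rw [PySem.Set.mem_update]; exact Or.inl (hinv x hx)
    · exact hinv x hx

-- a nested loop over a list of lists is the loop over the flattened pair list
lemma foldl_foldl_map_flatMap {α β γ : Type} (f : β → List γ) (step : α → γ → α)
    (l : List β) (init : α) :
    l.foldl (fun d b => (f b).foldl step d) init = (l.flatMap f).foldl step init := by
  induction l generalizing init with
  | nil => rfl
  | cons x xs ih => simp only [List.foldl_cons, List.flatMap_cons, List.foldl_append, ih]

-- membership in the 'hit' accumulation loop
lemma mem_foldl_update {α β : Type} [BEq α] [LawfulBEq α] (g : β → List α) (l : List β)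
    (s : PySem.Set α) (y : α) :
    y ∈ l.foldl (fun s b => PySem.Set.update s (g b)) s ↔ y ∈ s ∨ ∃ b ∈ l, y ∈ g b := by
  induction l generalizing s with
  | nil => simp
  | cons x xs ih =>
    simp only [List.foldl_cons, ih, PySem.Set.mem_update, List.mem_cons]
    constructor
    · rintro ((h | h) | ⟨b, hb, hy⟩)
      · exact Or.inl h
      · exact Or.inr ⟨x, Or.inl rfl, h⟩
      · exact Or.inr ⟨b, Or.inr hb, hy⟩
    · rintro (h | ⟨b, (rfl | hb), hy⟩)
      · exact Or.inl (Or.inl h)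
      · exact Or.inl (Or.inr hy)
      · exact Or.inr ⟨b, hb, hy⟩

-- index correctness: i is listed under member m iff m belongs to group number i
lemma mem_index (groups : List (List String)) (m : String) (i : Int) :
    i ∈ PySem.Dict.getD
      ((PySem.List.enumerate groups).foldl
        (fun d gi => gi.2.foldl (fun d m' => PySem.Dict.modify d m' [] (fun l => l ++ [gi.1])) d)
        PySem.Dict.empty) m [] ↔
    ∃ gi ∈ PySem.List.enumerate groups, gi.1 = i ∧ m ∈ gi.2 := by
  have hconv : ∀ (d : PySem.Dict String (List Int)) (gi : Int × List String),
      gi.2.foldl (fun d m' => PySem.Dict.modify d m' [] (fun l => l ++ [gi.1])) d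
      = (gi.2.map (fun m' => (m', gi.1))).foldl
          (fun d p => PySem.Dict.modify d p.1 [] (fun l => l ++ [p.2])) d := by
    intro d gi; rw [List.foldl_map]
  simp only [hconv]
  rw [foldl_foldl_map_flatMap (fun gi : Int × List String => gi.2.map (fun m' => (m', gi.1)))
    (fun d p => PySem.Dict.modify d p.1 [] (fun l => l ++ [p.2]))
    (PySem.List.enumerate groups) PySem.Dict.empty]
  rw [PySem.Dict.getD_foldl_modify_append, PySem.Dict.getD_empty, List.nil_append]
  simp only [List.mem_map, List.mem_filter, List.mem_flatMap]
  constructor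
  · rintro ⟨p, ⟨⟨gi, hgi, ⟨m', hm', rfl⟩⟩, hpm⟩, rfl⟩
    exact ⟨gi, hgi, rfl, by simpa using (eq_of_beq hpm) ▸ hm'⟩
  · rintro ⟨gi, hgi, rfl, hm⟩
    exact ⟨(m, gi.1), ⟨⟨gi, hgi, ⟨m, hm, rfl⟩⟩, by simp⟩, rfl⟩

-- an index occurring in the enumeration determines its group
lemma enum_snd_unique (groups : List (List String)) (gi gj : Int × List String)
    (hi : gi ∈ PySem.List.enumerate groups) (hj : gj ∈ PySem.List.enumerate groups)
    (h : gi.1 = gj.1) : gi.2 = gj.2 := by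
  rw [PySem.List.mem_enumerate_iff] at hi hj
  obtain ⟨k, hk, rfl⟩ := hi
  obtain ⟨k', hk', rfl⟩ := hj
  simp only [zero_add] at h
  have : k = k' := by exact_mod_cast h
  subst this; rfl

-- the hit test on a group id equals "some member of the group is a tag"
lemma contains_hit (tags : List String) (groups : List (List String))
    (gi : Int × List String) (hgi : gi ∈ PySem.List.enumerate groups) :
    PySem.Set.contains
      (tags.foldl (fun s t => PySem.Set.update s (PySem.Dict.getD
        ((PySem.List.enumerate groups).foldl
          (fun d gi => gi.2.foldl (fun d m => PySem.Dict.modify d m [] (fun l => l ++ [gi.1])) d)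
          PySem.Dict.empty) t []))
        (PySem.Set.empty : PySem.Set Int)) gi.1
      = gi.2.any (fun m => PySem.Set.contains tags m) := by
  rw [Bool.eq_iff_iff, PySem.Set.contains_iff,
    mem_foldl_update (g := fun t => PySem.Dict.getD _ t [])]
  simp only [PySem.Set.empty, List.not_mem_nil, false_or, mem_index, List.any_eq_true,
    PySem.Set.contains_iff]
  constructor
  · rintro ⟨t, ht, gj, hgj, hji, hm⟩
    exact ⟨t, enum_snd_unique groups gj gi hgj hgi hji ▸ hm, ht⟩
  · rintro ⟨m, hm, hmt⟩
    exact ⟨m, hmt, gi, hgi, rfl, hm⟩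

-- dropping the enumeration index: the final loop only reads the group component
lemma foldl_snd_if (tags : List String) (l : List (Int × List String)) (init : PySem.Set String) :
    l.foldl (fun e gi =>
      if gi.2.any (fun m => PySem.Set.contains tags m) then PySem.Set.update e gi.2 else e) init
      = (l.map (fun gi => gi.2)).foldl (fun e g =>
          if g.any (fun m => PySem.Set.contains tags m) then PySem.Set.update e g else e) init := by
  induction l generalizing init with
  | nil => rfl
  | cons x xs ih => simp only [List.foldl_cons, List.map_cons]; exact ih _

-- B's final loop reduces to the canonical fold
lemma foldB_eq (tags : List String) (aliases : List (String × List String)) :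
    expand_profile_tags_alt tags aliases =
      aliases.foldl (canonStep tags) (PySem.Set.ofList tags) := by
  unfold expand_profile_tags_alt
  dsimp only
  have h1 : (PySem.List.enumerate (aliases.map (fun p => PySem.Str.lower p.1 :: p.2.map PySem.Str.lower))).foldl
      (fun expanded gi =>
        if PySem.Set.contains
            (tags.foldl (fun s t => PySem.Set.update s (PySem.Dict.getD
              ((PySem.List.enumerate (aliases.map (fun p => PySem.Str.lower p.1 :: p.2.map PySem.Str.lower))).foldl
                (fun d gi => gi.2.foldl (fun d m => PySem.Dict.modify d m [] (fun l => l ++ [gi.1])) d)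
                PySem.Dict.empty) t []))
              (PySem.Set.empty : PySem.Set Int)) gi.1
        then PySem.Set.update expanded gi.2 else expanded)
      (PySem.Set.ofList tags)
      = (PySem.List.enumerate (aliases.map (fun p => PySem.Str.lower p.1 :: p.2.map PySem.Str.lower))).foldl
      (fun expanded gi =>
        if gi.2.any (fun m => PySem.Set.contains tags m) then PySem.Set.update expanded gi.2 else expanded)
      (PySem.Set.ofList tags) := by
    apply PySem.List.foldl_congr_mem
    intro acc gi hgi
    rw [contains_hit tags _ gi hgi]
  rw [h1]
  rw [foldl_snd_if tags, PySem.List.map_snd_enumerate, List.foldl_map]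
  rfl

-- ===== VERDICT (by name: the statement is the Claim_ definition above) =====
theorem expand_profile_tags_spec : Claim_equal_expand_profile_tags := by
  intro tags aliases _
  unfold Spec_expand_profile_tags
  rw [foldB_eq tags aliases]
  unfold expand_profile_tags
  exact foldA_eq tags aliases _ (fun x hx => by
    simpa [PySem.Set.mem_ofList] using (PySem.Set.contains_iff tags x).mp hx)
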